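-- pv_equiv track=rewrite | github.com/memgrafter/flatmachines | sdk/examples/coding_machine_discord/python/src/tool_use_discord/tools.py | _truncate_head
-- ===== SOURCE A (Python) =====
-- MAX_LINES = 2000
--
-- MAX_BYTES = 50 * 1024  # 50KB
--
-- def _truncate_head(content: str, max_lines: int = MAX_LINES, max_bytes: int = MAX_BYTES):
--     """Keep first N lines/bytes. For file reads."""
--     lines = content.split("\n")
--     total_lines = len(lines)
--     total_bytes = len(content.encode("utf-8"))
--
--     if total_lines <= max_lines and total_bytes <= max_bytes:
--         return content, False, total_lines
--
--     output = []
--     byte_count = 0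
--     for i, line in enumerate(lines):
--         if i >= max_lines:
--             break
--         line_bytes = len(line.encode("utf-8")) + (1 if i > 0 else 0)
--         if byte_count + line_bytes > max_bytes:
--             break
--         output.append(line)
--         byte_count += line_bytes
--
--     return "\n".join(output), True, total_lines
-- ===== SOURCE B (Python) =====
-- MAX_LINES = 2000
--
-- MAX_BYTES = 50 * 1024  # 50KB
--
-- def _truncate_head(content: str, max_lines: int = MAX_LINES, max_bytes: int = MAX_BYTES):
--     """Keep first N lines/bytes. Prefix-sum table + binary search instead of the incremental break loop."""
--     lines = content.split("\n")
--     total_lines = len(lines)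
--     total_bytes = len(content.encode("utf-8"))
--
--     if total_lines <= max_lines and total_bytes <= max_bytes:
--         return content, False, total_lines
--
--     # cum[i] = bytes of '\n'.join(lines[:i+1])
--     cum = []
--     running = 0
--     for i, line in enumerate(lines):
--         running += len(line.encode("utf-8")) + (1 if i > 0 else 0)
--         cum.append(running)
--
--     # binary search: first index with cum[idx] > max_bytes (cum is nondecreasing)
--     lo, hi = 0, total_lines
--     while lo < hi:
--         mid = (lo + hi) // 2
--         if cum[mid] <= max_bytes:
--             lo = mid + 1
--         else:
--             hi = mid
--
--     k = min(lo, max_lines)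
--     if k < 0:
--         k = 0
--     return "\n".join(lines[:k]), True, total_lines
-- ===== Notes on version B (the rewrite author's own statement) =====
-- stated objective: alternative
-- what changed: Replaces A's incremental accumulate-and-break loop with a precomputed prefix-sum table of cumulative byte costs plus a hand-written binary search for the byte cutoff, then a single capped slice.
import Mathlib
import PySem

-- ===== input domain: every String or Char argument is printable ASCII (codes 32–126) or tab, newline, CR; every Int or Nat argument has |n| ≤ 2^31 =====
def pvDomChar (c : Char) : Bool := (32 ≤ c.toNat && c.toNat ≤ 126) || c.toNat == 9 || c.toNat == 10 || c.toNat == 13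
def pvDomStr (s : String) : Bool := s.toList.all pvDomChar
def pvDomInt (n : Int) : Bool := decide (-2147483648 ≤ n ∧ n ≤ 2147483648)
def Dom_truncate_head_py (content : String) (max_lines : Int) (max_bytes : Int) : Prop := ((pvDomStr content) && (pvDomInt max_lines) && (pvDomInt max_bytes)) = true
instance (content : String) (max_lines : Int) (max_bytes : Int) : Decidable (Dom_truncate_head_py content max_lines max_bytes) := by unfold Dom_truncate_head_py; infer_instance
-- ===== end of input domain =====

-- B replaces A's incremental accumulate-and-break loop by a prefix-sum table of cumulative
-- byte costs plus a hand-written binary search for the cutoff (objective: alternative).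
-- len(s.encode("utf-8")) is ported as PySem.Str.len: exact on the ASCII domain Dom (1 byte/char).

-- ===== PORT A =====
-- the accumulate-and-break loop of A (output accumulated reversed, Python list.append)
def pvALoop (maxLines maxBytes : Int) : List String → Int → Int → List String → List String
  | [], _, _, out => out.reverse
  | line :: rest, i, byteCount, out =>
    if maxLines ≤ i then out.reverse
    else
      let lineBytes : Int := (PySem.Str.len line : Int) + (if 0 < i then 1 else 0)
      if maxBytes < byteCount + lineBytes then out.reverse
      else pvALoop maxLines maxBytes rest (i + 1) (byteCount + lineBytes) (line :: out)

def truncate_head_py (content : String) (max_lines : Int) (max_bytes : Int) : String × Bool × Int :=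
  let lines := (PySem.Str.split? content "\n").getD []  -- sep "\n" ≠ "", so split? is always some
  let total_lines : Int := lines.length
  let total_bytes : Int := (PySem.Str.len content : Int)  -- utf-8 byte length: exact on ASCII Dom
  if total_lines ≤ max_lines ∧ total_bytes ≤ max_bytes then (content, false, total_lines)
  else (PySem.Str.join "\n" (pvALoop max_lines max_bytes lines 0 0 []), true, total_lines)

-- ===== PORT B =====
-- cum[i] = bytes of '\n'.join(lines[:i+1]) (Source B's running-sum loop)
def pvCum : List String → Int → Int → List Int
  | [], _, _ => []
  | line :: rest, i, running =>
    let running' := running + ((PySem.Str.len line : Int) + (if 0 < i then 1 else 0))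
    running' :: pvCum rest (i + 1) running'

-- Source B's while-loop binary search; cum[mid] read with default 0 (mid is always in range here)
def pvBisect (cum : List Int) (maxBytes : Int) (lo hi : Int) : Int :=
  if h : lo < hi then
    let mid := PySem.Int.floordiv (lo + hi) 2
    if (cum.getD mid.toNat 0) ≤ maxBytes then pvBisect cum maxBytes (mid + 1) hi
    else pvBisect cum maxBytes lo mid
  else lo
termination_by (hi - lo).toNat
decreasing_by
  all_goals
    simp only [PySem.Int.floordiv] at *
    have h2 : (lo + hi).fdiv 2 = (lo + hi) / 2 := Int.fdiv_eq_ediv_of_nonneg _ (by norm_num)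
    omega

def truncate_head_py_alt (content : String) (max_lines : Int) (max_bytes : Int) : String × Bool × Int :=
  let lines := (PySem.Str.split? content "\n").getD []  -- sep "\n" ≠ "", so split? is always some
  let total_lines : Int := lines.length
  let total_bytes : Int := (PySem.Str.len content : Int)  -- utf-8 byte length: exact on ASCII Dom
  if total_lines ≤ max_lines ∧ total_bytes ≤ max_bytes then (content, false, total_lines)
  else
    let cum := pvCum lines 0 0
    let lo := pvBisect cum max_bytes 0 total_lines
    let k := min lo max_lines
    let k := if k < 0 then 0 else k
    (PySem.Str.join "\n" (lines.take k.toNat), true, total_lines)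

-- ===== PRECONDITION & SPEC =====
def Spec_truncate_head_py (content : String) (max_lines : Int) (max_bytes : Int) (out : String × Bool × Int) : Prop := out = truncate_head_py_alt content max_lines max_bytes
instance (content : String) (max_lines : Int) (max_bytes : Int) (out : String × Bool × Int) : Decidable (Spec_truncate_head_py content max_lines max_bytes out) := by unfold Spec_truncate_head_py; infer_instance

-- ===== CLAIM (what is proved, stated in full; the proofs are below) =====
def Claim_equal_truncate_head_py : Prop := ∀ (content : String) (max_lines : Int) (max_bytes : Int), Dom_truncate_head_py content max_lines max_bytes → Spec_truncate_head_py content max_lines max_bytes (truncate_head_py content max_lines max_bytes)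

-- ===== LEMMAS AND PROOFS =====

-- number of lines A's loop keeps
def pvCnt (maxLines maxBytes : Int) : List String → Int → Int → Nat
  | [], _, _ => 0
  | line :: rest, i, byteCount =>
    if maxLines ≤ i then 0
    else
      let lineBytes : Int := (PySem.Str.len line : Int) + (if 0 < i then 1 else 0)
      if maxBytes < byteCount + lineBytes then 0
      else 1 + pvCnt maxLines maxBytes rest (i + 1) (byteCount + lineBytes)

-- number of leading entries ≤ m
def pvCntLe (m : Int) : List Int → Nat
  | [] => 0
  | x :: xs => if x ≤ m then 1 + pvCntLe m xs else 0

theorem pvALoop_eq (maxL maxB : Int) : ∀ (ls : List String) (i bc : Int) (out : List String),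
    pvALoop maxL maxB ls i bc out = out.reverse ++ ls.take (pvCnt maxL maxB ls i bc) := by
  intro ls
  induction ls with
  | nil => intro i bc out; simp [pvALoop, pvCnt]
  | cons l rest ih =>
    intro i bc out
    simp only [pvALoop, pvCnt]
    set lb := (PySem.Str.len l : Int) + (if 0 < i then 1 else 0) with hlb
    split_ifs with h1 h2
    · simp
    · simp
    · rw [ih, Nat.add_comm, List.take_succ_cons]
      simp

theorem pvCnt_eq (maxL maxB : Int) : ∀ (ls : List String) (i bc : Int),
    pvCnt maxL maxB ls i bc = min (maxL - i).toNat (pvCntLe maxB (pvCum ls i bc)) := by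
  intro ls
  induction ls with
  | nil => intro i bc; simp [pvCnt, pvCum, pvCntLe]
  | cons l rest ih =>
    intro i bc
    simp only [pvCnt, pvCum, pvCntLe]
    set lb := (PySem.Str.len l : Int) + (if 0 < i then 1 else 0) with hlb
    split_ifs <;> (try rw [ih]) <;> omega

theorem pvCum_length : ∀ (ls : List String) (i bc : Int), (pvCum ls i bc).length = ls.length := by
  intro ls
  induction ls with
  | nil => intro i bc; simp [pvCum]
  | cons l rest ih => intro i bc; simp [pvCum, ih]

theorem pvCum_le_getD : ∀ (ls : List String) (i bc : Int) (k : Nat), k < (pvCum ls i bc).length →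
    bc ≤ (pvCum ls i bc).getD k 0 := by
  intro ls
  induction ls with
  | nil => intro i bc k hk; simp [pvCum] at hk
  | cons l rest ih =>
    intro i bc k hk
    have hlen : (0:Int) ≤ (PySem.Str.len l : Int) := Int.natCast_nonneg _
    match k with
    | 0 => simp only [pvCum, List.getD_cons_zero]; split_ifs <;> omega
    | Nat.succ k' =>
      simp only [pvCum, List.getD_cons_succ] at *
      have := ih (i + 1) (bc + ((PySem.Str.len l : Int) + (if 0 < i then 1 else 0))) k' (by simpa using hk)
      split_ifs at * <;> omega

theorem pvCum_mono : ∀ (ls : List String) (i bc : Int) (j k : Nat), j ≤ k → k < (pvCum ls i bc).length →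
    (pvCum ls i bc).getD j 0 ≤ (pvCum ls i bc).getD k 0 := by
  intro ls
  induction ls with
  | nil => intro i bc j k hjk hk; simp [pvCum] at hk
  | cons l rest ih =>
    intro i bc j k hjk hk
    match j, k with
    | 0, 0 => omega
    | 0, Nat.succ k' =>
      simp only [pvCum, List.getD_cons_zero, List.getD_cons_succ] at *
      exact pvCum_le_getD rest (i + 1) _ k' (by simpa using hk)
    | Nat.succ j', Nat.succ k' =>
      simp only [pvCum, List.getD_cons_succ] at *
      exact ih (i + 1) _ j' k' (by omega) (by simpa using hk)

theorem pvBisect_spec_aux (cum : List Int) (m : Int)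
    (mono : ∀ j k : Nat, j ≤ k → k < cum.length → cum.getD j 0 ≤ cum.getD k 0) :
    ∀ (n : Nat) (lo hi : Int), (hi - lo).toNat ≤ n → 0 ≤ lo → lo ≤ hi → hi ≤ cum.length →
    (∀ j : Nat, (j : Int) < lo → cum.getD j 0 ≤ m) →
    (∀ j : Nat, hi ≤ (j : Int) → j < cum.length → m < cum.getD j 0) →
    0 ≤ pvBisect cum m lo hi ∧ pvBisect cum m lo hi ≤ cum.length ∧
    (∀ j : Nat, (j : Int) < pvBisect cum m lo hi → cum.getD j 0 ≤ m) ∧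
    (∀ j : Nat, pvBisect cum m lo hi ≤ (j : Int) → j < cum.length → m < cum.getD j 0) := by
  intro n
  induction n with
  | zero =>
    intro lo hi hn h0 h1 h2 hlo hhi
    have hlt : ¬ lo < hi := by omega
    rw [pvBisect, dif_neg hlt]
    exact ⟨h0, by omega, fun j hj => hlo j hj, fun j hj hjl => hhi j (by omega) hjl⟩
  | succ n ihn =>
    intro lo hi hn h0 h1 h2 hlo hhi
    by_cases hlt : lo < hi
    · have hfd : PySem.Int.floordiv (lo + hi) 2 = (lo + hi) / 2 := by
        simp only [PySem.Int.floordiv]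
        exact Int.fdiv_eq_ediv_of_nonneg _ (by norm_num)
      have hb : lo ≤ PySem.Int.floordiv (lo + hi) 2 ∧ PySem.Int.floordiv (lo + hi) 2 < hi := by
        rw [hfd]; omega
      rw [pvBisect]
      simp only [dif_pos hlt]
      by_cases hle : cum.getD (PySem.Int.floordiv (lo + hi) 2).toNat 0 ≤ m
      · rw [if_pos hle]
        refine ihn (PySem.Int.floordiv (lo + hi) 2 + 1) hi (by omega) (by omega) (by omega) h2
          ?_ hhi
        intro j hj
        by_cases hjm : (j : Int) < lo
        · exact hlo j hjm
        · have hj1 : j ≤ (PySem.Int.floordiv (lo + hi) 2).toNat := by omega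
          have hm : (PySem.Int.floordiv (lo + hi) 2).toNat < cum.length := by omega
          exact le_trans (mono j _ hj1 hm) hle
      · rw [if_neg hle]
        refine ihn lo (PySem.Int.floordiv (lo + hi) 2) (by omega) h0 (by omega) (by omega) hlo ?_
        intro j hj hjl
        by_cases hjm : hi ≤ (j : Int)
        · exact hhi j hjm hjl
        · have hj1 : (PySem.Int.floordiv (lo + hi) 2).toNat ≤ j := by omega
          have := mono (PySem.Int.floordiv (lo + hi) 2).toNat j hj1 hjl
          omega
    · rw [pvBisect, dif_neg hlt]
      exact ⟨h0, by omega, fun j hj => hlo j hj, fun j hj hjl => hhi j (by omega) hjl⟩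

theorem pvCntLe_of_spec (m : Int) : ∀ (cum : List Int) (r : Int), 0 ≤ r → r ≤ cum.length →
    (∀ j : Nat, (j : Int) < r → cum.getD j 0 ≤ m) →
    (∀ j : Nat, r ≤ (j : Int) → j < cum.length → m < cum.getD j 0) →
    (pvCntLe m cum : Int) = r := by
  intro cum
  induction cum with
  | nil => intro r h0 h1 _ _; simp at h1 ⊢; omega
  | cons x xs ih =>
    intro r h0 h1 hlo hhi
    simp only [pvCntLe]
    by_cases hx : x ≤ m
    · have hr : 1 ≤ r := by
        by_contra hc
        have := hhi 0 (by omega) (by simp)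
        simp at this; omega
      rw [if_pos hx]
      have := ih (r - 1) (by omega) (by simp at h1 ⊢; omega)
        (by intro j hj
            have := hlo (j + 1) (by push_cast; omega)
            simpa using this)
        (by intro j hj hjl
            have := hhi (j + 1) (by push_cast; omega) (by simp; omega)
            simpa using this)
      push_cast
      omega
    · rw [if_neg hx]
      have : r ≤ 0 := by
        by_contra hc
        exact hx (by simpa using hlo 0 (by omega))
      simp; omega

theorem truncate_head_py_eq (content : String) (maxL maxB : Int) :
    truncate_head_py content maxL maxB = truncate_head_py_alt content maxL maxB := by
  unfold truncate_head_py truncate_head_py_alt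
  set lines := (PySem.Str.split? content "\n").getD []  -- sep "\n" ≠ "", so split? is always some with hlines
  by_cases h : ((lines.length : Int) ≤ maxL ∧ (PySem.Str.len content : Int) ≤ maxB)
  · rw [if_pos h, if_pos h]
  · rw [if_neg h, if_neg h]
    refine congrArg (fun s => (s, true, (lines.length : Int))) ?_
    refine congrArg (PySem.Str.join "\n") ?_
    rw [pvALoop_eq, pvCnt_eq]
    simp only [List.reverse_nil, List.nil_append]
    set cum := pvCum lines 0 0 with hcum
    have hclen : cum.length = lines.length := pvCum_length lines 0 0
    have hspec := pvBisect_spec_aux cum maxB (pvCum_mono lines 0 0) ((lines.length : Int) - 0).toNat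
      0 (lines.length : Int) (by omega) (by omega) (by omega) (by omega)
      (by intro j hj; omega)
      (by intro j hj hjl; omega)
    set r := pvBisect cum maxB 0 (lines.length : Int) with hr
    obtain ⟨hr0, hr1, hrlo, hrhi⟩ := hspec
    have hcnt : (pvCntLe maxB cum : Int) = r :=
      pvCntLe_of_spec maxB cum r hr0 (by omega) hrlo hrhi
    refine congrArg (fun n => lines.take n) ?_
    omega

-- ===== VERDICT (by name: the statement is the Claim_ definition above) =====
theorem truncate_head_py_spec : Claim_equal_truncate_head_py := by
  intro content maxL maxB _
  unfold Spec_truncate_head_py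
  exact truncate_head_py_eq content maxL maxB
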